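-- pv_equiv track=rewrite | github.com/idnbso/advent-of-code-2022 | day6/tuning_trouble.py | get_first_marker_position
-- ===== SOURCE A (Python) =====
-- MARKER_SEQUENCE_LEN = 14
--
-- def get_first_marker_position(buffer):
--     marker_position = -1
--     for position in range(len(buffer) - MARKER_SEQUENCE_LEN):
--         chars_set = set()
--         for characterIndex in range(position, position + MARKER_SEQUENCE_LEN):
--             chars_set.add(buffer[characterIndex])
--
--         if len(chars_set) == MARKER_SEQUENCE_LEN:
--             marker_position = position + MARKER_SEQUENCE_LEN
--             break
--     return marker_position
-- ===== SOURCE B (Python) =====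
-- MARKER_SEQUENCE_LEN = 14
--
-- def get_first_marker_position(buffer):
--     # Sliding window: keep the longest duplicate-free suffix of the scanned
--     # prefix; when it reaches 14 chars the marker just ended.
--     window = []
--     for i, ch in enumerate(buffer):
--         if ch in window:
--             window = window[window.index(ch) + 1:]
--         window.append(ch)
--         if len(window) == MARKER_SEQUENCE_LEN:
--             return i + 1
--     return -1
-- ===== Notes on version B (the rewrite author's own statement) =====
-- stated objective: faster
-- what changed: Replaces A's per-position rebuild of a 14-char set (O(n*k) with k=14 set inserts per position) by a single sliding pass that maintains the longest duplicate-free suffix window, cutting it after a repeated char; B also examines the final window, which A's range(len-14) off-by-one never tests.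
-- intended difference: On strings whose only duplicate-free 14-char window is the final one, A returns -1 because range(len(buffer)-14) stops one position short, while B returns len(buffer), the intended marker position. — e.g. on get_first_marker_position("abcdefghijklmn"): A returns -1, B returns 14
import Mathlib
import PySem

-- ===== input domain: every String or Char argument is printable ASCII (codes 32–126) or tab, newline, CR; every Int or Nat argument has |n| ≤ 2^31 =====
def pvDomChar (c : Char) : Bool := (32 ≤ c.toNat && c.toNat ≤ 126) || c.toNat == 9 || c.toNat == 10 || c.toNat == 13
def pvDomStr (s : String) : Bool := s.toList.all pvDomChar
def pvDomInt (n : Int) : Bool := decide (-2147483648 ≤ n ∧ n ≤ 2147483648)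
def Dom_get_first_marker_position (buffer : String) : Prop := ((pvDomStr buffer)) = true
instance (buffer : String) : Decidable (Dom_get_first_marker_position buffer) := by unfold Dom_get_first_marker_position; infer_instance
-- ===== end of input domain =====

-- B replaces A's rebuild-a-set-per-position scan by a single sliding pass keeping the longest
-- duplicate-free suffix window; B also checks the final window, which A's range(len-14) skips (see D_).

-- ===== PORT A =====
-- inner loop: chars_set.add(buffer[characterIndex]) for characterIndex in range(position, position+14)
-- (the index is always in range here, so pyGetD with a default is exact)
def pvAInner (l : List Char) (p : Int) : PySem.Set Char :=
  (PySem.List.pyRange p (p + 14) 1).foldl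
    (fun s i => PySem.Set.add s (PySem.List.pyGetD l i ' ')) PySem.Set.empty
-- the outer for-loop; 'break' after setting marker_position is the early return of p + 14,
-- falling off the loop returns the initial marker_position = -1
def pvALoop (l : List Char) : List Int → Int
  | [] => -1
  | p :: ps =>
    let chars_set := pvAInner l p
    if PySem.Set.len chars_set == 14 then p + 14 else pvALoop l ps

def get_first_marker_position (buffer : String) : Int :=
  pvALoop buffer.toList (PySem.List.pyRange 0 (PySem.Str.len buffer - 14) 1)

-- ===== PORT B =====
-- 'for i, ch in enumerate(buffer)' with early return, carrying (window, i);
-- window[window.index(ch) + 1:] is PySem.List.slice with the nonnegative start index + 1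
def pvBLoop (l : List Char) (window : List Char) (i : Int) : Int :=
  match l with
  | [] => -1
  | ch :: rest =>
    let w := if window.contains ch then
        PySem.List.slice window (some ((((PySem.List.index? window ch).getD 0 + 1 : Nat) : Int))) none
      else window
    let w := w ++ [ch]
    if w.length == 14 then i + 1 else pvBLoop rest w (i + 1)

def get_first_marker_position_alt (buffer : String) : Int :=
  pvBLoop buffer.toList [] 0

-- ===== PRECONDITION & SPEC =====
-- A scans only window starts 0..len-15, so when the only duplicate-free 14-char window is the
-- final one it returns -1, while B returns len(buffer), the intended marker position.
def D_get_first_marker_position (buffer : String) : Prop :=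
  14 ≤ buffer.toList.length ∧
  ((buffer.toList.drop (buffer.toList.length - 14)).take 14).Nodup ∧
  ∀ p < buffer.toList.length - 14, ¬ ((buffer.toList.drop p).take 14).Nodup
instance (buffer : String) : Decidable (D_get_first_marker_position buffer) := by
  unfold D_get_first_marker_position; infer_instance

def Spec_get_first_marker_position (buffer : String) (out : Int) : Prop :=
  ¬ D_get_first_marker_position buffer → out = get_first_marker_position_alt buffer
instance (buffer : String) (out : Int) : Decidable (Spec_get_first_marker_position buffer out) := by
  unfold Spec_get_first_marker_position; infer_instance

def pvDiffWitness_get_first_marker_position : String := "abcdefghijklmn"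
def pvDiffWitnessOut_get_first_marker_position : Int × Int := (-1, 14)

-- ===== CLAIM (what is proved, stated in full; the proofs are below) =====
def Claim_unchanged_get_first_marker_position : Prop := ∀ (buffer : String), Dom_get_first_marker_position buffer → Spec_get_first_marker_position buffer (get_first_marker_position buffer)
def Claim_changed_get_first_marker_position : Prop := Dom_get_first_marker_position (pvDiffWitness_get_first_marker_position) ∧ D_get_first_marker_position (pvDiffWitness_get_first_marker_position) ∧ get_first_marker_position (pvDiffWitness_get_first_marker_position) = pvDiffWitnessOut_get_first_marker_position.1 ∧ get_first_marker_position_alt (pvDiffWitness_get_first_marker_position) = pvDiffWitnessOut_get_first_marker_position.2 ∧ pvDiffWitnessOut_get_first_marker_position.1 ≠ pvDiffWitnessOut_get_first_marker_position.2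
def Claim_exact_get_first_marker_position : Prop := ∀ (buffer : String), Dom_get_first_marker_position buffer → D_get_first_marker_position buffer → get_first_marker_position buffer ≠ get_first_marker_position_alt buffer

-- ===== LEMMAS AND PROOFS =====

-- the 14-char window starting at p, and "first good window start below b"
def pvWin (l : List Char) (p : Nat) : List Char := (l.drop p).take 14
def pvFG (l : List Char) (b : Nat) : Option Nat :=
  (List.range b).find? (fun p => decide (pvWin l p).Nodup)
def pvRender (o : Option Nat) : Int := match o with | some p => (p : Int) + 14 | none => -1

theorem pvWin_len (l : List Char) (p : Nat) (hp : p + 14 ≤ l.length) :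
    (pvWin l p).length = 14 := by simp [pvWin]; omega

theorem pvWin_eq_map (l : List Char) (p : Nat) (hp : p + 14 ≤ l.length) :
    pvWin l p = (List.range 14).map (fun k => l.getD (p + k) ' ') := by
  apply List.ext_getElem
  · rw [pvWin_len l p hp]; simp
  · intro k h1 h2
    rw [pvWin_len l p hp] at h1
    simp only [List.getElem_map, List.getElem_range]
    have hk : p + k < l.length := by omega
    rw [List.getD_eq_getElem l ' ' hk]
    simp [pvWin, List.getElem_take, List.getElem_drop]

-- ---- A-side: the inner fold builds set(window), whose size is 14 iff the window has no duplicate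

theorem pvAInner_eq (l : List Char) (p : Nat) (hp : p + 14 ≤ l.length) :
    pvAInner l (p : Int) = PySem.Set.ofList (pvWin l p) := by
  unfold pvAInner
  rw [PySem.List.pyRange_one, show ((p:Int) + 14 - (p:Int)).toNat = 14 by omega,
    List.foldl_map, pvWin_eq_map l p hp, ← PySem.Set.update_empty,
    PySem.Set.update_map_eq_foldl_add]
  apply PySem.List.foldl_congr_mem
  intro acc k hk
  rw [show ((p : Int) + (k : Int)) = ((p + k : Nat) : Int) by push_cast; ring,
    PySem.List.pyGetD_natCast]

theorem pvFoldlAdd_sublist {s t : List Char} (xs : List Char) (h : List.Sublist s t) :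
    List.Sublist (List.foldl PySem.Set.add s xs) (t ++ xs) := by
  induction xs generalizing s t with
  | nil => simpa using h
  | cons x xs ih =>
    simp only [List.foldl_cons]
    have h2 : List.Sublist (PySem.Set.add s x) (t ++ [x]) := by
      unfold PySem.Set.add
      split
      · exact h.trans (List.sublist_append_left t [x])
      · exact h.append (List.Sublist.refl [x])
    simpa using ih h2

theorem pvOfList_sublist (xs : List Char) : List.Sublist (PySem.Set.ofList xs) xs := by
  have := pvFoldlAdd_sublist (s := []) (t := []) xs (List.Sublist.refl [])
  rw [PySem.Set.ofList_eq_foldl]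
  simpa using this

theorem pvSetLen_iff (xs : List Char) :
    ((PySem.Set.ofList xs).length = xs.length) ↔ xs.Nodup := by
  constructor
  · intro h
    rw [← List.Sublist.eq_of_length (pvOfList_sublist xs) h]
    exact PySem.Set.nodup_ofList xs
  · intro h; rw [PySem.Set.ofList_eq_self_of_nodup xs h]

theorem pvALoop_eq (l : List Char) (ps : List Nat) (h : ∀ p ∈ ps, p + 14 ≤ l.length) :
    pvALoop l (ps.map Int.ofNat) =
      pvRender (ps.find? (fun p => decide (pvWin l p).Nodup)) := by
  induction ps with
  | nil => rfl
  | cons p ps ih =>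
    have hp := h p (by simp)
    rw [List.map_cons]
    show (if PySem.Set.len (pvAInner l (p : Int)) == 14 then (p : Int) + 14
        else pvALoop l (ps.map Int.ofNat)) = _
    rw [pvAInner_eq l p hp, List.find?_cons]
    have hlen : PySem.Set.len (PySem.Set.ofList (pvWin l p)) == 14
        ↔ (pvWin l p).Nodup := by
      rw [show PySem.Set.len (PySem.Set.ofList (pvWin l p))
            = ((PySem.Set.ofList (pvWin l p)).length : Int) from rfl]
      rw [beq_iff_eq, ← pvSetLen_iff, pvWin_len l p hp]
      constructor
      · intro hh; omega
      · intro hh; omega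
    by_cases hnd : (pvWin l p).Nodup
    · rw [if_pos (hlen.mpr hnd)]
      simp [hnd, pvRender]
    · rw [if_neg (fun hc => hnd (hlen.mp hc))]
      simp only [hnd, decide_false]
      exact ih (fun q hq => h q (by simp [hq]))

theorem pvA_eq (s : String) :
    get_first_marker_position s = pvRender (pvFG s.toList (s.toList.length - 14)) := by
  unfold get_first_marker_position
  rw [PySem.Str.len_eq, PySem.List.pyRange_one]
  have h1 : ((s.toList.length : Int) - 14 - 0).toNat = s.toList.length - 14 := by omega
  rw [h1]
  have h2 : (List.range (s.toList.length - 14)).map (fun k => (0 : Int) + (k : Nat))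
      = (List.range (s.toList.length - 14)).map Int.ofNat := by simp [Int.ofNat_eq_natCast]
  rw [h2, pvALoop_eq _ _ (by intro p hp; simp only [List.mem_range] at hp; omega)]
  rfl

-- ---- B-side: the window maintained by pvBLoop is the longest duplicate-free suffix

def pvStep (w : List Char) (c : Char) : List Char :=
  (if c ∈ w then w.drop (w.idxOf c + 1) else w) ++ [c]
def pvMds (q : List Char) : List Char := q.foldl pvStep []

theorem pvSuffix_concat {t u : List Char} (h : t <:+ u) (c : Char) : t ++ [c] <:+ u ++ [c] := by
  obtain ⟨v, hv⟩ := h; exact ⟨v, by rw [← List.append_assoc, hv]⟩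

theorem pvDecomp {w : List Char} {c : Char} (h : c ∈ w) :
    w = w.take (w.idxOf c) ++ c :: w.drop (w.idxOf c + 1) := by
  have hj : w.idxOf c < w.length := List.idxOf_lt_length_of_mem h
  conv_lhs => rw [← List.take_append_drop (w.idxOf c) w]
  rw [List.drop_eq_getElem_cons hj, List.getElem_idxOf hj]

theorem pvStep_inv {w : List Char} {pre : List Char} (c : Char)
    (hnd : w.Nodup) (hsuf : w <:+ pre) (hmax : ∀ t, t.Nodup → t <:+ pre → t <:+ w) :
    (pvStep w c).Nodup ∧ pvStep w c <:+ pre ++ [c] ∧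
      ∀ t, t.Nodup → t <:+ pre ++ [c] → t <:+ pvStep w c := by
  refine ⟨?_, ?_, ?_⟩
  · unfold pvStep
    by_cases h : c ∈ w
    · simp only [h, if_true]
      have hdec := pvDecomp h
      have : (w.take (w.idxOf c) ++ c :: w.drop (w.idxOf c + 1)).Nodup := hdec ▸ hnd
      have hcnot : c ∉ w.drop (w.idxOf c + 1) := by
        have := (List.nodup_append.mp this).2.1
        exact (List.nodup_cons.mp this).1
      refine List.Nodup.append (hnd.sublist (List.drop_sublist _ _)) (List.nodup_singleton c) ?_
      intro x hx hx'; simp at hx'; subst hx'; exact hcnot hx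
    · simp only [h, if_false]
      exact List.Nodup.append hnd (List.nodup_singleton c) (by simpa using fun hc => h hc)
  · unfold pvStep
    by_cases h : c ∈ w
    · simp only [h, if_true]
      exact pvSuffix_concat ((List.drop_suffix _ _).trans hsuf) c
    · simp only [h, if_false]; exact pvSuffix_concat hsuf c
  · intro t htnd htsuf
    rcases List.eq_nil_or_concat' t with rfl | ⟨t', d, rfl⟩
    · exact List.nil_suffix
    · obtain ⟨v, hv⟩ := htsuf
      have hd : d = c := by
        have := congrArg (fun l => l.getLast?) hv
        simpa using this
      subst hd
      have ht' : t' <:+ pre := by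
        have := congrArg List.dropLast hv
        simp at this
        exact ⟨v, by simpa using this⟩
      have hcnt' : d ∉ t' := by
        have := List.nodup_append.mp htnd
        intro hc; exact this.2.2 _ hc d (by simp) rfl
      have htw : t' <:+ w := hmax t' (List.Nodup.of_append_left htnd) ht'
      unfold pvStep
      by_cases h : d ∈ w
      · simp only [h, if_true]
        obtain ⟨u, rfl⟩ := htw
        have hcu : d ∈ u := by
          rcases List.mem_append.mp h with h1 | h1
          · exact h1
          · exact absurd h1 hcnt'
        have hidx : (u ++ t').idxOf d + 1 ≤ u.length := by
          have : (u ++ t').idxOf d < u.length := by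
            rw [List.idxOf_append_of_mem hcu]
            exact List.idxOf_lt_length_of_mem hcu
          omega
        have heq : (u ++ t').drop ((u ++ t').idxOf d + 1)
            = u.drop ((u ++ t').idxOf d + 1) ++ t' := List.drop_append_of_le_length hidx
        exact pvSuffix_concat (heq ▸ List.suffix_append _ _) d
      · simp only [h, if_false]; exact pvSuffix_concat htw d

theorem pvMds_concat (q : List Char) (c : Char) : pvMds (q ++ [c]) = pvStep (pvMds q) c := by
  simp [pvMds, List.foldl_append]

theorem pvMds_inv (q : List Char) :
    (pvMds q).Nodup ∧ pvMds q <:+ q ∧ ∀ t, t.Nodup → t <:+ q → t <:+ pvMds q := by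
  induction q using List.reverseRecOn with
  | nil => exact ⟨List.nodup_nil, List.nil_suffix, fun t _ ht => ht⟩
  | append_singleton q c ih =>
    rw [pvMds_concat]
    exact pvStep_inv c ih.1 ih.2.1 ih.2.2

theorem pvIndexGetD (w : List Char) (c : Char) (h : c ∈ w) :
    (PySem.List.index? w c).getD 0 = w.idxOf c := by
  induction w with
  | nil => cases h
  | cons x w ih =>
    by_cases hx : x = c
    · subst hx
      rw [PySem.List.index?_cons_self]
      simp [List.idxOf_cons_self]
    · rw [PySem.List.index?_cons_of_ne w hx]
      have hcw : c ∈ w := (List.mem_cons.mp h).resolve_left (fun e => hx e.symm)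
      have := PySem.List.index?_isSome_iff (xs := w) (v := c)
      rcases ho : PySem.List.index? w c with _ | j
      · rw [ho] at this; simp [hcw] at this
      · simp only [Option.map_some, Option.getD_some]
        have : w.idxOf c = (PySem.List.index? w c).getD 0 := (ih hcw).symm
        rw [ho] at this; simp at this
        rw [List.idxOf_cons_ne _ (by simpa using hx)]
        omega

theorem pvStep_eq (w : List Char) (c : Char) :
    ((if w.contains c then
        PySem.List.slice w (some ((((PySem.List.index? w c).getD 0 + 1 : Nat) : Int))) none
      else w) ++ [c]) = pvStep w c := by
  by_cases h : c ∈ w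
  · simp only [pvStep, h, if_true, List.contains_eq_mem, decide_true,
      PySem.List.slice_from_natCast, pvIndexGetD w c h]
  · simp only [pvStep, h, if_false, List.contains_eq_mem, decide_false]
    simp

theorem pvStep_len (w : List Char) (c : Char) : (pvStep w c).length ≤ w.length + 1 := by
  unfold pvStep; split <;> simp

theorem pvB_bridge (l : List Char) : ∀ (rest q : List Char), l = q ++ rest →
    (pvMds q).length ≤ 13 →
    pvBLoop rest (pvMds q) (q.length : Int) =
      (match (List.range' q.length rest.length).find?
          (fun e => decide (14 ≤ (pvMds (l.take (e+1))).length)) with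
        | some e => (e : Int) + 1 | none => -1) := by
  intro rest
  induction rest with
  | nil => intro q hl hlen; rfl
  | cons c rest' ih =>
    intro q hl hlen
    have hq1 : l.take (q.length + 1) = q ++ [c] := by
      rw [hl, List.take_append]
      simp
    have hmds' : pvMds (q ++ [c]) = pvStep (pvMds q) c := pvMds_concat q c
    have hlen' : (pvMds (q ++ [c])).length ≤ 14 := by
      rw [hmds']; have := pvStep_len (pvMds q) c; omega
    show (let w := if (pvMds q).contains c then
            PySem.List.slice (pvMds q) (some ((((PySem.List.index? (pvMds q) c).getD 0 + 1 : Nat) : Int))) none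
          else pvMds q
          let w := w ++ [c]
          if w.length == 14 then (q.length : Int) + 1 else pvBLoop rest' w ((q.length : Int) + 1)) = _
    simp only [pvStep_eq (pvMds q) c]
    rw [List.length_cons, List.range'_succ]
    rw [List.find?_cons]
    by_cases h14 : (pvStep (pvMds q) c).length = 14
    · have : (14 ≤ (pvMds (l.take (q.length + 1))).length) := by
        rw [hq1, hmds', h14]
      simp only [this, decide_true, h14, beq_self_eq_true, if_true]
    · have hlt : (pvMds (q ++ [c])).length ≤ 13 := by
        rw [hmds'] at hlen' ⊢; omega
      have hnot : ¬ (14 ≤ (pvMds (l.take (q.length + 1))).length) := by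
        rw [hq1]; omega
      simp only [hnot, decide_false]
      rw [if_neg (by simpa using h14)]
      have := ih (q ++ [c]) (by rw [hl]; simp) hlt
      rw [hmds'] at this
      simpa using this

-- the sliding test at end-index e decodes to the window test at start e - 13
theorem pvMds_len_iff (l : List Char) (e : Nat) (he : e < l.length) :
    (14 ≤ (pvMds (l.take (e+1))).length) ↔ (13 ≤ e ∧ (pvWin l (e-13)).Nodup) := by
  set r := l.take (e+1) with hr
  have hrlen : r.length = e + 1 := by simp [hr]; omega
  obtain ⟨hnd, hsuf, hmax⟩ := pvMds_inv r
  constructor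
  · intro h14
    have hle : (pvMds r).length ≤ e + 1 := hrlen ▸ hsuf.length_le
    have he13 : 13 ≤ e := by omega
    refine ⟨he13, ?_⟩
    have hwin : pvWin l (e-13) = r.drop (e + 1 - 14) := by
      rw [hr, List.drop_take, pvWin]
      congr 1
      omega
    obtain ⟨u, hu⟩ := hsuf
    have hulen : u.length + (pvMds r).length = e + 1 := by
      have := congrArg List.length hu
      simpa [hrlen] using this
    have hud : pvMds r = r.drop u.length := by
      have h' : (u ++ pvMds r).drop u.length = pvMds r := by simp
      rw [hu] at h'
      exact h'.symm
    have : r.drop (e + 1 - 14) = (pvMds r).drop ((e + 1 - 14) - u.length) := by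
      rw [hud, List.drop_drop]
      congr 1
      omega
    rw [hwin, this]
    exact hnd.sublist (List.drop_sublist _ _)
  · rintro ⟨he13, hwnd⟩
    have hwin : pvWin l (e-13) = r.drop (e + 1 - 14) := by
      rw [hr, List.drop_take, pvWin]
      congr 1
      omega
    have hsufw : pvWin l (e-13) <:+ r := hwin ▸ List.drop_suffix _ _
    have := hmax _ hwnd hsufw
    have hlen : (pvWin l (e-13)).length = 14 := pvWin_len l (e-13) (by omega)
    have := this.length_le
    omega

theorem pvFind?_congr {α : Type} (l : List α) (p q : α → Bool) (h : ∀ x ∈ l, p x = q x) :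
    l.find? p = l.find? q := by
  induction l with
  | nil => rfl
  | cons x l ih =>
    rw [List.find?_cons, List.find?_cons, h x (by simp)]
    split
    · rfl
    · exact ih (fun y hy => h y (by simp [hy]))

theorem pvB_eq (s : String) :
    get_first_marker_position_alt s = pvRender (pvFG s.toList (s.toList.length - 13)) := by
  set l := s.toList with hl
  set n := l.length with hn
  have h0 : get_first_marker_position_alt s = pvBLoop l (pvMds []) ((List.length ([] : List Char)) : Int) := rfl
  rw [h0, pvB_bridge l l [] (by simp) (by simp [pvMds])]
  simp only [List.length_nil]
  have hcongr : (List.range' 0 n).find? (fun e => decide (14 ≤ (pvMds (l.take (e+1))).length))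
      = (List.range' 0 n).find? (fun e => decide (13 ≤ e ∧ (pvWin l (e-13)).Nodup)) := by
    apply pvFind?_congr
    intro e he
    have : e < n := by
      have := List.mem_range'_1.mp he
      omega
    simp [pvMds_len_iff l e (hn ▸ this)]
  rw [hcongr]
  by_cases hle : n ≤ 13
  · have h1 : (List.range' 0 n).find? (fun e => decide (13 ≤ e ∧ (pvWin l (e-13)).Nodup)) = none := by
      rw [List.find?_eq_none]
      intro x hx
      have := List.mem_range'_1.mp hx
      simp only [decide_eq_true_eq]
      omega
    have h2 : pvFG l (n - 13) = none := by
      have : n - 13 = 0 := by omega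
      rw [this]; rfl
    rw [h1, h2]; rfl
  · have hsplit : List.range' 0 n = List.range' 0 13 ++ List.range' 13 (n - 13) := by
      rw [List.range'_append_1]
      congr 1
      omega
    rw [hsplit, List.find?_append]
    have h1 : (List.range' 0 13).find? (fun e => decide (13 ≤ e ∧ (pvWin l (e-13)).Nodup)) = none := by
      rw [List.find?_eq_none]
      intro x hx
      have := List.mem_range'_1.mp hx
      simp only [decide_eq_true_eq]
      omega
    rw [h1, Option.none_or]
    rw [List.range'_eq_map_range, List.find?_map]
    have h2 : ((List.range (n - 13)).find? ((fun e => decide (13 ≤ e ∧ (pvWin l (e-13)).Nodup)) ∘ (fun x => 13 + x)))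
        = pvFG l (n - 13) := by
      apply pvFind?_congr
      intro k hk
      simp only [Function.comp_apply]
      have h13 : 13 + k - 13 = k := by omega
      simp [h13]
    rw [h2]
    rcases pvFG l (n - 13) with _ | k
    · rfl
    · show ((13 + k : Nat) : Int) + 1 = (k : Int) + 14
      push_cast; ring

-- ===== VERDICT (by name: the statement is the Claim_ definition above) =====
theorem get_first_marker_position_spec : Claim_unchanged_get_first_marker_position := by
  intro s _ hD
  rw [pvA_eq, pvB_eq]
  set l := s.toList with hl
  set n := l.length with hn
  by_cases hle : n ≤ 13
  · have : n - 14 = n - 13 := by omega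
    rw [this]
  · have hsucc : n - 13 = (n - 14) + 1 := by omega
    rw [hsucc]
    unfold pvFG
    rw [show n - 14 + 1 = (n - 14).succ from rfl, List.range_succ, List.find?_append]
    rcases hfg : (List.range (n - 14)).find? (fun p => decide (pvWin l p).Nodup) with _ | p
    · rw [Option.none_or]
      have hbad : ¬ (pvWin l (n - 14)).Nodup := by
        intro hgood
        apply hD
        refine ⟨?_, ?_, ?_⟩
        · show (14 : Nat) ≤ n
          omega
        · exact hgood
        · intro p hp hnodup
          have := List.find?_eq_none.mp hfg p (List.mem_range.mpr (show p < n - 14 from hp))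
          exact this (decide_eq_true (show (pvWin l p).Nodup from hnodup))
      rw [List.find?_cons]
      have hdec : (decide (pvWin l (n - 14)).Nodup) = false := decide_eq_false hbad
      rw [hdec]
      rfl
    · rfl

theorem get_first_marker_position_changed : Claim_changed_get_first_marker_position := by
  unfold Claim_changed_get_first_marker_position; decide

theorem get_first_marker_position_tight : Claim_exact_get_first_marker_position := by
  intro s _ hD
  obtain ⟨h14, hgood, hbad⟩ := hD
  rw [pvA_eq, pvB_eq]
  set l := s.toList with hl
  set n := l.length with hn
  have h14' : (14 : Nat) ≤ n := h14
  have hA : pvFG l (n - 14) = none := by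
    unfold pvFG
    rw [List.find?_eq_none]
    intro p hp
    simp only [decide_eq_true_eq]
    exact hbad p (List.mem_range.mp hp)
  have hsucc : n - 13 = (n - 14) + 1 := by omega
  have hB : pvFG l (n - 13) = some (n - 14) := by
    unfold pvFG
    rw [hsucc, show n - 14 + 1 = (n - 14).succ from rfl, List.range_succ, List.find?_append]
    unfold pvFG at hA
    rw [hA, Option.none_or, List.find?_cons]
    rw [decide_eq_true (show (pvWin l (n - 14)).Nodup from hgood)]
  rw [hA, hB]
  intro hcon
  simp [pvRender] at hcon
  omega
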